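-- pv_equiv track=rewrite | github.com/pypi-data/pypi-mirror-93 | packages/EVALLIES/EVALLIES-0.2.5.tar.gz/EVALLIES-0.2.5/evallies/der_cross.py | frontiers_add_collar
-- ===== SOURCE A (Python) =====
-- def frontiers_add_collar(front, collar):
--     cfront = []
--     for f in front:
--         a = f[1] - collar
--         b = f[1] + collar
--         if a < 0:
--             a = 0
--         if len(cfront) == 0 or a > cfront[-1][1]:
--             cfront.append((f[0], a))
--             cfront.append(("t", b))
--         else:
--             cfront[-1] = ("t", b)
--     return cfront
-- ===== SOURCE B (Python) =====
-- def frontiers_add_collar(front, collar):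
--     # Two-pointer grouping scan. Observation: A's running "current end" is
--     # always the previous point's t + collar, so whether point j merges with
--     # the group is decided purely by comparing consecutive input points:
--     # max(0, front[j][1] - collar) <= front[j-1][1] + collar.
--     out = []
--     i, n = 0, len(front)
--     while i < n:
--         j = i + 1
--         while j < n and max(0, front[j][1] - collar) <= front[j - 1][1] + collar:
--             j += 1
--         out.append((front[i][0], max(0, front[i][1] - collar)))
--         out.append(("t", front[j - 1][1] + collar))
--         i = j
--     return out
-- ===== Notes on version B (the rewrite author's own statement) =====
-- stated objective: alternative
-- what changed: Replaces A's stateful fold that appends to / mutates the last element of the output list using a running current-end with a two-pointer grouping scan: group boundaries are decided purely by a predicate on consecutive input points (clamped start of point j vs point j-1's end), and each maximal run emits exactly two output pairs.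
import Mathlib
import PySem

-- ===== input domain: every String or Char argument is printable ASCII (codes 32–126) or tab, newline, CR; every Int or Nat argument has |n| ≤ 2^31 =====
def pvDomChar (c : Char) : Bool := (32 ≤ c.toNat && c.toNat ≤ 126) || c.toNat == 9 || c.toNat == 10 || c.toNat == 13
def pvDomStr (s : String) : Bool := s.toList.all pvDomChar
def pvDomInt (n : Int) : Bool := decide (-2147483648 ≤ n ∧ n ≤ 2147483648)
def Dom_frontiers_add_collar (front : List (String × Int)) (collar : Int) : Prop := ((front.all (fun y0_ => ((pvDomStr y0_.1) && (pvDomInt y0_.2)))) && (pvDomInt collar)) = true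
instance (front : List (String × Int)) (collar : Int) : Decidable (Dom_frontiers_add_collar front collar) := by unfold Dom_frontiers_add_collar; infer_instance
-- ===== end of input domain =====

-- B replaces A's stateful fold (append / mutate the last output pair using a running
-- current-end) with a two-pointer grouping scan whose boundaries are decided purely by
-- comparing consecutive input points (objective: alternative, same cost).

-- ===== PORT A =====
-- one iteration of A's loop: mutate/extend the flat list cfront
def pvStepA (collar : Int) (cfront : List (String × Int)) (f : String × Int) : List (String × Int) :=
  let a := f.2 - collar
  let b := f.2 + collar
  let a := if a < 0 then 0 else a
  match cfront.getLast? with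
  | none => cfront ++ [(f.1, a), ("t", b)]
  | some last =>
    if a > last.2 then cfront ++ [(f.1, a), ("t", b)]
    else cfront.dropLast ++ [("t", b)]

def frontiers_add_collar (front : List (String × Int)) (collar : Int) : List (String × Int) :=
  front.foldl (pvStepA collar) []

-- ===== PORT B =====
-- inner while loop: advance j through the run; prevT is front[j-1][1], the list is front[j:].
-- returns (front[j-1][1] at exit, front[j:] at exit)
def pvRun (collar : Int) (prevT : Int) : List (String × Int) → Int × List (String × Int)
  | [] => (prevT, [])
  | (lab, t) :: rest =>
    if max 0 (t - collar) ≤ prevT + collar then pvRun collar t rest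
    else (prevT, (lab, t) :: rest)

-- the remaining list only shrinks (cited by pvGo's decreasing_by)
theorem pvRun_len (collar : Int) : ∀ (l : List (String × Int)) (prevT : Int),
    (pvRun collar prevT l).2.length ≤ l.length := by
  intro l
  induction l with
  | nil => intro prevT; simp [pvRun]
  | cons h r ih =>
    intro prevT
    obtain ⟨lab, t⟩ := h
    simp only [pvRun]
    split
    · exact (ih t).trans (by simp)
    · simp

-- outer while loop: each maximal run emits exactly two output pairs
def pvGo (collar : Int) : List (String × Int) → List (String × Int)
  | [] => []
  | (lab, t) :: rest =>
    (lab, max 0 (t - collar)) :: ("t", (pvRun collar t rest).1 + collar)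
      :: pvGo collar (pvRun collar t rest).2
termination_by l => l.length
decreasing_by exact Nat.lt_succ_of_le (pvRun_len _ _ _)

def frontiers_add_collar_alt (front : List (String × Int)) (collar : Int) : List (String × Int) :=
  pvGo collar front

-- ===== PRECONDITION & SPEC =====
def Spec_frontiers_add_collar (front : List (String × Int)) (collar : Int) (out : List (String × Int)) : Prop := out = frontiers_add_collar_alt front collar
instance (front : List (String × Int)) (collar : Int) (out : List (String × Int)) : Decidable (Spec_frontiers_add_collar front collar out) := by unfold Spec_frontiers_add_collar; infer_instance

-- ===== CLAIM (what is proved, stated in full; the proofs are below) =====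
def Claim_equal_frontiers_add_collar : Prop := ∀ (front : List (String × Int)) (collar : Int), Dom_frontiers_add_collar front collar → Spec_frontiers_add_collar front collar (frontiers_add_collar front collar)

-- ===== LEMMAS AND PROOFS =====

-- while pvRun absorbs a run, A's fold only rewrites the last pair's end
theorem foldl_run (collar : Int) : ∀ (rest : List (String × Int)) (prevT : Int)
    (acc : List (String × Int)) (x : String × Int),
    rest.foldl (pvStepA collar) (acc ++ [x, ("t", prevT + collar)])
      = (pvRun collar prevT rest).2.foldl (pvStepA collar)
          (acc ++ [x, ("t", (pvRun collar prevT rest).1 + collar)]) := by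
  intro rest
  induction rest with
  | nil => intro prevT acc x; simp [pvRun]
  | cons h r ih =>
    intro prevT acc x
    obtain ⟨lab, t⟩ := h
    by_cases hle : max 0 (t - collar) ≤ prevT + collar
    · have hstep : pvStepA collar (acc ++ [x, ("t", prevT + collar)]) (lab, t)
          = acc ++ [x, ("t", t + collar)] := by
        have hlast : (acc ++ [x, ("t", prevT + collar)]).getLast? = some ("t", prevT + collar) := by
          simp [List.getLast?_append]
        have hdrop : (acc ++ [x, ("t", prevT + collar)]).dropLast = acc ++ [x] := by
          simp [List.dropLast_append_of_ne_nil]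
        simp only [pvStepA, hlast]
        rw [if_neg (by simp at hle ⊢; omega), hdrop]
        simp
      simp only [List.foldl_cons, hstep, pvRun, if_pos hle]
      exact ih t acc x
    · simp only [pvRun, if_neg hle]

-- after pvRun stops, the next point (if any) starts a strictly later group
theorem pvRun_fresh (collar : Int) : ∀ (l : List (String × Int)) (prevT lab t : _)
    (r : List (String × Int)), (pvRun collar prevT l).2 = (lab, t) :: r →
    max 0 (t - collar) > (pvRun collar prevT l).1 + collar := by
  intro l
  induction l with
  | nil => intro prevT lab t r h; simp [pvRun] at h
  | cons p rest ih =>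
    intro prevT lab t r h
    obtain ⟨lab', t'⟩ := p
    simp only [pvRun] at h ⊢
    split at h
    · rename_i hc
      rw [if_pos hc]
      exact ih t' lab t r h
    · rename_i hc
      rw [if_neg hc]
      obtain ⟨h1, h2⟩ := (List.cons.injEq ..).mp h
      obtain ⟨rfl, rfl⟩ := Prod.mk.injEq .. ▸ h1
      simp at hc ⊢
      omega

-- a fresh accumulator: empty, or front's head starts strictly after acc's last end
def pvFresh (collar : Int) (front acc : List (String × Int)) : Prop :=
  acc = [] ∨ ∀ lab t r s b, front = (lab, t) :: r → acc.getLast? = some (s, b) →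
    max 0 (t - collar) > b

-- A's fold from a fresh accumulator just appends B's grouped output
theorem foldl_go (collar : Int) : ∀ (n : ℕ) (front acc : List (String × Int)),
    front.length ≤ n → pvFresh collar front acc →
    front.foldl (pvStepA collar) acc = acc ++ pvGo collar front := by
  intro n
  induction n with
  | zero =>
    intro front acc hlen _
    have : front = [] := List.eq_nil_of_length_eq_zero (Nat.le_zero.mp hlen)
    subst this; simp [pvGo]
  | succ n ih =>
    intro front acc hlen hfresh
    match front with
    | [] => simp [pvGo]
    | (lab, t) :: r =>
      have hstep : pvStepA collar acc (lab, t)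
          = acc ++ [(lab, max 0 (t - collar)), ("t", t + collar)] := by
        simp only [pvStepA]
        have hmax : (if t - collar < 0 then 0 else t - collar) = max 0 (t - collar) := by omega
        match hval : acc.getLast? with
        | none =>
          simp only [hmax]
        | some last =>
          obtain ⟨s, b⟩ := last
          have hgt : max 0 (t - collar) > b := by
            rcases hfresh with h0 | hf
            · subst h0; simp at hval
            · exact hf lab t r s b rfl hval
          simp only [hmax]
          rw [if_pos hgt]
      have hrun := foldl_run collar r t acc (lab, max 0 (t - collar))
      have hlen2 : (pvRun collar t r).2.length ≤ n := by
        have := pvRun_len collar r t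
        simp at hlen; omega
      have hfresh2 : pvFresh collar (pvRun collar t r).2
          (acc ++ [(lab, max 0 (t - collar)), ("t", (pvRun collar t r).1 + collar)]) := by
        right
        intro lab' t' r' s b heq hlast
        have := pvRun_fresh collar r t lab' t' r' heq
        have hb : b = (pvRun collar t r).1 + collar := by
          rw [List.getLast?_append] at hlast
          simp at hlast
          omega
        omega
      calc ((lab, t) :: r).foldl (pvStepA collar) acc
          = r.foldl (pvStepA collar) (acc ++ [(lab, max 0 (t - collar)), ("t", t + collar)]) := by
            rw [List.foldl_cons, hstep]
        _ = (pvRun collar t r).2.foldl (pvStepA collar)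
              (acc ++ [(lab, max 0 (t - collar)), ("t", (pvRun collar t r).1 + collar)]) := hrun
        _ = acc ++ [(lab, max 0 (t - collar)), ("t", (pvRun collar t r).1 + collar)]
              ++ pvGo collar (pvRun collar t r).2 := ih _ _ hlen2 hfresh2
        _ = acc ++ pvGo collar ((lab, t) :: r) := by
            rw [pvGo]; simp

-- ===== VERDICT (by name: the statement is the Claim_ definition above) =====
theorem frontiers_add_collar_spec : Claim_equal_frontiers_add_collar := by
  intro front collar _
  unfold Spec_frontiers_add_collar frontiers_add_collar frontiers_add_collar_alt
  have := foldl_go collar front.length front [] le_rfl (Or.inl rfl)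
  simpa using this
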